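-- pv_equiv track=rewrite | github.com/HKUST-KnowComp/SubeventWriter | prompt_template/iterative_t5_template.py | iterate_steps
-- ===== SOURCE A (Python) =====
-- import copy
--
-- def iterate_steps(title_list, subevents_list):
--     input_list, target_list = [], []
--     for title, subevents in zip(title_list, subevents_list):
--         subevents = copy.deepcopy(subevents) + ["none"]
--         for i in range(len(subevents)):
--             input = [title, subevents[:i]]
--             target = subevents[i]
--             input_list.append(input)
--             target_list.append(target)
--     return input_list, target_list
-- ===== SOURCE B (Python) =====
-- import copy
--
-- def iterate_steps(title_list, subevents_list):
--     input_list, target_list = [], []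
--     for title, subevents in zip(title_list, subevents_list):
--         prefix = []
--         for ev in copy.deepcopy(subevents) + ["none"]:
--             input_list.append([title, list(prefix)])
--             target_list.append(ev)
--             prefix.append(ev)
--     return input_list, target_list
-- ===== Notes on version B (the rewrite author's own statement) =====
-- stated objective: alternative
-- what changed: Replaces the per-step re-slicing subevents[:i] (O(i) per iteration) with an incrementally grown prefix accumulator that is snapshotted before each append.
import Mathlib
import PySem

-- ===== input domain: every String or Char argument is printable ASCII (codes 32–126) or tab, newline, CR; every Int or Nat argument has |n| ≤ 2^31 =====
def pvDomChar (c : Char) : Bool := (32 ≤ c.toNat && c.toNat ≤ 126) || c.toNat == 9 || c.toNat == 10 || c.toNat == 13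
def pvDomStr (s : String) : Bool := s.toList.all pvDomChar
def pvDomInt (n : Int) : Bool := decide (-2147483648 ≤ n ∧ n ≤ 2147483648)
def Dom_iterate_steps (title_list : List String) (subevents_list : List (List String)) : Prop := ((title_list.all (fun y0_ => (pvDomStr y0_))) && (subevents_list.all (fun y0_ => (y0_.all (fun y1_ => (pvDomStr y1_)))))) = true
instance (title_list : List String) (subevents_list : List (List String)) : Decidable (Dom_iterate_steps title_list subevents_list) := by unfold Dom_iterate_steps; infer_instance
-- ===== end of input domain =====

-- B replaces A's per-step re-slicing subevents[:i] with an incrementally grown prefix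
-- accumulator snapshotted before each append (same cost class; different decomposition).
-- Equivalence is about the RETURN value; neither program mutates its arguments.

-- ===== PORT A =====
-- for each (title, subevents): subs = deepcopy(subevents) + ["none"];
-- for i in range(len(subs)): append [title, subs[:i]] and subs[i].
def iterate_steps (title_list : List String) (subevents_list : List (List String)) : (List (String × List String)) × List String :=
  (title_list.zip subevents_list).foldl
    (fun acc p =>
      let subs := p.2 ++ ["none"]
      (List.range subs.length).foldl
        (fun acc2 (i : Nat) =>
          (acc2.1 ++ [(p.1, PySem.List.slice subs none (some (i : Int)))],
           acc2.2 ++ [(PySem.List.pyGet? subs (i : Int)).getD ""]))  -- i < len subs always: never the default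
        acc)
    ([], [])

-- ===== PORT B =====
-- running prefix accumulator: snapshot (title, prefix) before appending each event.
def iterate_steps_alt (title_list : List String) (subevents_list : List (List String)) : (List (String × List String)) × List String :=
  (title_list.zip subevents_list).foldl
    (fun acc p =>
      let r := (p.2 ++ ["none"]).foldl
        (fun (st : List (String × List String) × List String × List String) ev =>
          (st.1 ++ [(p.1, st.2.2)], st.2.1 ++ [ev], st.2.2 ++ [ev]))
        (acc.1, acc.2, [])
      (r.1, r.2.1))
    ([], [])

-- ===== PRECONDITION & SPEC =====
def Spec_iterate_steps (title_list : List String) (subevents_list : List (List String)) (out : (List (String × List String)) × List String) : Prop := out = iterate_steps_alt title_list subevents_list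
instance (title_list : List String) (subevents_list : List (List String)) (out : (List (String × List String)) × List String) : Decidable (Spec_iterate_steps title_list subevents_list out) := by unfold Spec_iterate_steps; infer_instance

-- ===== CLAIM (what is proved, stated in full; the proofs are below) =====
def Claim_equal_iterate_steps : Prop := ∀ (title_list : List String) (subevents_list : List (List String)), Dom_iterate_steps title_list subevents_list → Spec_iterate_steps title_list subevents_list (iterate_steps title_list subevents_list)

-- ===== LEMMAS AND PROOFS =====

-- generic shape of A's inner loop: two parallel append-folds over any index list
theorem foldA_shape (l : List ℕ) (f : ℕ → String × List String) (g : ℕ → String)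
    (il : List (String × List String)) (tl : List String) :
    l.foldl (fun acc2 i => (acc2.1 ++ [f i], acc2.2 ++ [g i])) (il, tl)
      = (il ++ l.map f, tl ++ l.map g) := by
  induction l generalizing il tl with
  | nil => simp
  | cons a t ih => simp [List.foldl_cons, ih]

theorem map_getD_range (xs : List String) :
    (List.range xs.length).map (fun i => xs.getD i "") = xs := by
  apply List.ext_getElem
  · simp
  · intro i h1 h2
    simp [List.getD, List.getElem?_eq_getElem h2]

-- B's inner loop, characterized with an arbitrary starting prefix p
theorem foldB_shape (evs : List String) (title : String) (p : List String)
    (il : List (String × List String)) (tl : List String) :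
    evs.foldl
        (fun (st : List (String × List String) × List String × List String) ev =>
          (st.1 ++ [(title, st.2.2)], st.2.1 ++ [ev], st.2.2 ++ [ev]))
        (il, tl, p)
      = (il ++ (List.range evs.length).map (fun i => (title, p ++ evs.take i)),
         tl ++ evs, p ++ evs) := by
  induction evs generalizing il tl p with
  | nil => simp
  | cons e t ih =>
    simp only [List.foldl_cons, ih, List.length_cons, List.range_succ_eq_map,
      List.map_cons, List.map_map]
    simp [Function.comp, List.append_assoc]

-- if the step functions agree pointwise, the folds agree
theorem foldl_ext {α β : Type} (f g : β → α → β) (h : ∀ b a, f b a = g b a)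
    (l : List α) (init : β) : l.foldl f init = l.foldl g init := by
  induction l generalizing init with
  | nil => rfl
  | cons a t ih => simp only [List.foldl_cons, h, ih]

theorem iterate_steps_spec' (title_list : List String) (subevents_list : List (List String)) :
    iterate_steps title_list subevents_list = iterate_steps_alt title_list subevents_list := by
  unfold iterate_steps iterate_steps_alt
  apply foldl_ext
  intro acc hd
  simp only
  rw [foldB_shape,
    foldA_shape (List.range (hd.2 ++ ["none"]).length)
      (fun (i : Nat) => (hd.1, PySem.List.slice (hd.2 ++ ["none"]) none (some (i : Int))))
      (fun (i : Nat) => (PySem.List.pyGet? (hd.2 ++ ["none"]) (i : Int)).getD "") acc.1 acc.2]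
  refine Prod.ext ?_ ?_ <;> dsimp only
  · congr 1
    apply List.map_congr_left
    intro i hi
    simp [PySem.List.slice_to_natCast]
  · congr 1
    calc (List.range (hd.2 ++ ["none"]).length).map
          (fun (i : Nat) => (PySem.List.pyGet? (hd.2 ++ ["none"]) (i : Int)).getD "")
        = (List.range (hd.2 ++ ["none"]).length).map
          (fun i => (hd.2 ++ ["none"]).getD i "") := by
          apply List.map_congr_left; intro i hi
          simp [PySem.List.pyGet?_natCast, List.getD]
      _ = hd.2 ++ ["none"] := map_getD_range _

-- ===== VERDICT (by name: the statement is the Claim_ definition above) =====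
theorem iterate_steps_spec : Claim_equal_iterate_steps := by
  intro t s _
  exact iterate_steps_spec' t s
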